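-- pv_equiv track=rewrite | github.com/HannesZ/StakeYieldFinance | BeaconChainStats.py | _best_checkpoint
-- ===== SOURCE A (Python) =====
-- def _best_checkpoint(cache: dict, target_index: int) -> dict | None:
--     # Return the checkpoint with the largest event_index <= target_index
--     cps = sorted(cache.get("checkpoints", []), key=lambda c: c["event_index"])
--     best = None
--     for cp in cps:
--         if cp["event_index"] <= target_index:
--             best = cp
--         else:
--             break
--     return best
-- ===== SOURCE B (Python) =====
-- def _best_checkpoint(cache: dict, target_index: int) -> dict | None:
--     # Single linear pass: keep the latest checkpoint with the largest event_index <= target_index.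
--     # '<=' on the running best reproduces the stable-sort tie-break (last original occurrence wins).
--     best = None
--     for cp in cache.get("checkpoints", []):
--         ei = cp["event_index"]
--         if ei <= target_index and (best is None or best["event_index"] <= ei):
--             best = cp
--     return best
-- ===== Notes on version B (the rewrite author's own statement) =====
-- stated objective: alternative
-- what changed: Replaces sort-then-scan-with-break by a single linear pass that tracks the qualifying checkpoint of maximal event_index (ties resolved to the later occurrence, matching the stable sort).
import Mathlib
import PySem

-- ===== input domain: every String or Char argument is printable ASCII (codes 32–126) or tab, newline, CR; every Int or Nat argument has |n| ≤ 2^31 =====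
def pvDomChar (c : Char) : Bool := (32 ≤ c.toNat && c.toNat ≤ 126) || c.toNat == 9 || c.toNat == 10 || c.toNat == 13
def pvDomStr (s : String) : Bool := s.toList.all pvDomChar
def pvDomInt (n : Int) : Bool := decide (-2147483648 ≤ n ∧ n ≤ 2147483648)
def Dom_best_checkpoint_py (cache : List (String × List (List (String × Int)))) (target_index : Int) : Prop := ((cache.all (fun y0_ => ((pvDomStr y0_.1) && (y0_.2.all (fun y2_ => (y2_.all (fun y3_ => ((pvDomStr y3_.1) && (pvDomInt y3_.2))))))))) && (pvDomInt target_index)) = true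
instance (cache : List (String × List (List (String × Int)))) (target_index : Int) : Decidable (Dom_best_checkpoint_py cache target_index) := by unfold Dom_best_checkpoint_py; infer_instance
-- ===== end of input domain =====

-- B replaces A's sort-then-scan-with-break by a single linear pass tracking the qualifying
-- checkpoint of maximal event_index (alternative algorithm); proved to return A's exact value.


-- ===== PORT A =====
-- cache.get("checkpoints", [])
def pvCps (cache : List (String × List (List (String × Int)))) : List (List (String × Int)) :=
  (PySem.Dict.mk cache).getD "checkpoints" []

-- cp["event_index"]; total via getD 0 — Pre_ guarantees the key is present, so the default is unreachable
def pvKey (cp : List (String × Int)) : Int :=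
  ((PySem.Dict.mk cp).get? "event_index").getD 0

-- the for-loop of A with its break, over the sorted list
def pvLoopA (target_index : Int) : List (List (String × Int)) → Option (List (String × Int)) → Option (List (String × Int))
  | [], best => best
  | cp :: rest, best =>
      if pvKey cp ≤ target_index then pvLoopA target_index rest (some cp) else best

def best_checkpoint_py (cache : List (String × List (List (String × Int)))) (target_index : Int) : Option (List (String × Int)) :=
  pvLoopA target_index (PySem.List.sorted (pvCps cache) pvKey) none

-- ===== PORT B =====
-- one update step of B's single pass: 'ei <= target_index and (best is None or best["event_index"] <= ei)'
def pvStepB (target_index : Int) (best : Option (List (String × Int))) (cp : List (String × Int)) : Option (List (String × Int)) :=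
  if decide (pvKey cp ≤ target_index) && best.all (fun b => decide (pvKey b ≤ pvKey cp))
  then some cp else best

def best_checkpoint_py_alt (cache : List (String × List (List (String × Int)))) (target_index : Int) : Option (List (String × Int)) :=
  (pvCps cache).foldl (pvStepB target_index) none

-- ===== PRECONDITION & SPEC =====
-- Pre_ excludes exactly the inputs where Python A raises KeyError: a checkpoint without the
-- "event_index" key (both A and B look that key up on every checkpoint).
def Pre_best_checkpoint_py (cache : List (String × List (List (String × Int)))) (target_index : Int) : Prop :=
  ∀ cp ∈ pvCps cache, (PySem.Dict.mk cp).contains "event_index" = true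
instance (cache : List (String × List (List (String × Int)))) (target_index : Int) : Decidable (Pre_best_checkpoint_py cache target_index) := by unfold Pre_best_checkpoint_py; infer_instance

def pvWitness_best_checkpoint_py : (List (String × List (List (String × Int)))) × Int :=
  ([("checkpoints", [[("event_index", 3)], [("event_index", 7)]])], 5)

def Spec_best_checkpoint_py (cache : List (String × List (List (String × Int)))) (target_index : Int) (out : Option (List (String × Int))) : Prop := out = best_checkpoint_py_alt cache target_index
instance (cache : List (String × List (List (String × Int)))) (target_index : Int) (out : Option (List (String × Int))) : Decidable (Spec_best_checkpoint_py cache target_index out) := by unfold Spec_best_checkpoint_py; infer_instance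

-- ===== CLAIM (what is proved, stated in full; the proofs are below) =====
def Claim_equal_best_checkpoint_py : Prop := ∀ (cache : List (String × List (List (String × Int)))) (target_index : Int), Dom_best_checkpoint_py cache target_index → Pre_best_checkpoint_py cache target_index → Spec_best_checkpoint_py cache target_index (best_checkpoint_py cache target_index)

-- ===== LEMMAS AND PROOFS =====

-- glue: getLast? of a cons, phrased with Option.or (exact? finds no library name for this form)
theorem pvGetLast?_cons {α : Type} (a : α) (l : List α) :
    (a :: l).getLast? = l.getLast?.or (some a) := by
  cases l with
  | nil => rfl
  | cons b m =>
      rw [List.getLast?_cons_cons]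
      cases h : (b :: m).getLast? with
      | none => simp [List.getLast?_eq_none_iff] at h
      | some => simp [Option.or]

-- A's loop returns the last element of the qualifying prefix (it breaks at the first non-qualifier)
theorem pvLoopA_eq_takeWhile (t : Int) (s : List (List (String × Int))) (b : Option (List (String × Int))) :
    pvLoopA t s b = ((s.takeWhile (fun cp => pvKey cp ≤ t)).getLast?).or b := by
  induction s generalizing b with
  | nil => simp [pvLoopA]
  | cons cp rest ih =>
      by_cases h : pvKey cp ≤ t
      · rw [pvLoopA, if_pos h, ih, List.takeWhile_cons]
        simp only [h, decide_true, if_pos, pvGetLast?_cons, Option.or_assoc, Option.some_or]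
      · simp [pvLoopA, h]

-- key step: one insertion-sort step on the sorted list corresponds to one step of B's pass
theorem pvGetLast_takeWhile_insertBy (t : Int) (x : List (String × Int)) (s : List (List (String × Int)))
    (hs : s.Pairwise (fun a b => pvKey a ≤ pvKey b)) :
    ((PySem.List.insertBy (fun a b => decide (pvKey a < pvKey b)) x s).takeWhile
        (fun cp => pvKey cp ≤ t)).getLast?
      = pvStepB t ((s.takeWhile (fun cp => pvKey cp ≤ t)).getLast?) x := by
  induction s with
  | nil =>
      by_cases h : pvKey x ≤ t <;>
        simp [PySem.List.insertBy, List.takeWhile, pvStepB, h]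
  | cons y rest ih =>
      rcases List.pairwise_cons.mp hs with ⟨hy, hrest⟩
      by_cases hlt : pvKey x < pvKey y
      · -- x goes in front: insertBy = x :: y :: rest
        simp only [PySem.List.insertBy, hlt, decide_true, if_pos]
        by_cases hqx : pvKey x ≤ t
        · rw [List.takeWhile_cons_of_pos (by simpa using hqx), pvGetLast?_cons]
          cases hb : ((y :: rest).takeWhile (fun cp => pvKey cp ≤ t)).getLast? with
          | none => simp [pvStepB, hqx]
          | some b =>
              have hbmem : b ∈ y :: rest :=
                (List.takeWhile_sublist _).subset (List.mem_of_getLast? hb)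
              have hyb : pvKey y ≤ pvKey b := by
                rcases List.mem_cons.mp hbmem with h | h
                · exact h ▸ le_refl _
                · exact hy b h
              have hbx : ¬ pvKey b ≤ pvKey x := by omega
              simp [pvStepB, hqx, hbx]
        · -- x does not qualify, and key y > key x > t, so nothing does
          have hqy : ¬ pvKey y ≤ t := by omega
          rw [List.takeWhile_cons_of_neg (by simpa using hqx),
            List.takeWhile_cons_of_neg (by simpa using hqy)]
          simp [pvStepB, hqx]
      · -- y stays in front: insertBy = y :: insertBy x rest
        simp only [PySem.List.insertBy, hlt, decide_false, Bool.false_eq_true, if_false]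
        have hyx : pvKey y ≤ pvKey x := by omega
        by_cases hqy : pvKey y ≤ t
        · rw [List.takeWhile_cons_of_pos (by simpa using hqy),
            List.takeWhile_cons_of_pos (by simpa using hqy),
            pvGetLast?_cons, pvGetLast?_cons, ih hrest]
          cases hb : ((rest.takeWhile (fun cp => pvKey cp ≤ t))).getLast? with
          | none =>
              by_cases hqx : pvKey x ≤ t
              · simp [pvStepB, hqx, hyx]
              · simp [pvStepB, hqx]
          | some b =>
              by_cases hqx : pvKey x ≤ t
              · by_cases hbx : pvKey b ≤ pvKey x
                · simp [pvStepB, hqx, hbx]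
                · simp [pvStepB, hqx, hbx]
              · simp [pvStepB, hqx]
        · -- key y > t, and key x ≥ key y: both takeWhiles are empty
          have hqx : ¬ pvKey x ≤ t := by omega
          rw [List.takeWhile_cons_of_neg (by simpa using hqy),
            List.takeWhile_cons_of_neg (by simpa using hqy)]
          simp [pvStepB, hqx]

-- main bridge: B's fold over xs equals the last qualifying element of the sorted list
theorem pvFoldB_eq_sorted (t : Int) (xs : List (List (String × Int))) :
    xs.foldl (pvStepB t) none
      = ((PySem.List.sorted xs pvKey).takeWhile (fun cp => pvKey cp ≤ t)).getLast? := by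
  induction xs using List.reverseRecOn with
  | nil => simp [PySem.List.sorted]
  | append_singleton xs x ih =>
      have hsorted : PySem.List.sorted (xs ++ [x]) pvKey
          = PySem.List.insertBy (fun a b => decide (pvKey a < pvKey b)) x (PySem.List.sorted xs pvKey) := by
        rw [PySem.List.sorted_eq_foldl_insertBy, PySem.List.sorted_eq_foldl_insertBy,
          List.foldl_append]
        rfl
      rw [List.foldl_append, List.foldl_cons, List.foldl_nil, ih, hsorted,
        pvGetLast_takeWhile_insertBy t x _ (PySem.List.sorted_pairwise xs pvKey)]

-- ===== VERDICT (by name: the statement is the Claim_ definition above) =====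
theorem best_checkpoint_py_spec : Claim_equal_best_checkpoint_py := by
  intro cache target_index _ _
  unfold Spec_best_checkpoint_py best_checkpoint_py best_checkpoint_py_alt
  rw [pvLoopA_eq_takeWhile, pvFoldB_eq_sorted, Option.or_none]
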